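-- pv_equiv track=rewrite | github.com/StarAbhi/StarAbhi | listTask.py | count_each_hashtags
-- ===== SOURCE A (Python) =====
-- def count_each_hashtags(hashtags):
--     hashtags_dict = {}
--     for hashtag in hashtags:
--         if hashtag in hashtags_dict:
--             hashtags_dict[hashtag] += 1
--         else:
--             hashtags_dict[hashtag] = 1
--     return hashtags_dict
-- ===== SOURCE B (Python) =====
-- def count_each_hashtags(hashtags):
--     xs = list(hashtags)
--     return {h: xs.count(h) for h in dict.fromkeys(xs)}
-- ===== Notes on version B (the rewrite author's own statement) =====
-- stated objective: idiomatic
-- what changed: Replaces the single-pass mutable counter dict with an ordered dedup of the keys followed by a count() rescan per distinct hashtag, built as one dict comprehension.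
import Mathlib
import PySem

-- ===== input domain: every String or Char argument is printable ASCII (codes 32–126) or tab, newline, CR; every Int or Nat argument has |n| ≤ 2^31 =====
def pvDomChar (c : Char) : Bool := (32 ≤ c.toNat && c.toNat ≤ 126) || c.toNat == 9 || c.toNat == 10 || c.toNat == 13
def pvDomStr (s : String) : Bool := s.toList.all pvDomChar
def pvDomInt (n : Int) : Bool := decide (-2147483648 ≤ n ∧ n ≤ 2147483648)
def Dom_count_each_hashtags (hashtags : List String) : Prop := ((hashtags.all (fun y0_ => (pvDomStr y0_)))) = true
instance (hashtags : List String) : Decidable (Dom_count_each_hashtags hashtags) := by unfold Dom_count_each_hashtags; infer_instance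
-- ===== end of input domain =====

-- B: ordered dedup of the keys + a count() rescan per distinct hashtag, instead of A's mutable counter dict.
-- ===== PORT A =====
def count_each_hashtags (hashtags : List String) : List (String × Int) :=
  (hashtags.foldl (fun hashtags_dict hashtag =>
      if hashtags_dict.contains hashtag then
        hashtags_dict.insert hashtag (hashtags_dict.getD hashtag 0 + 1)
      else
        hashtags_dict.insert hashtag 1)
    (PySem.Dict.empty : PySem.Dict String Int)).items

-- ===== PORT B =====
def count_each_hashtags_alt (hashtags : List String) : List (String × Int) :=
  (PySem.List.dedup hashtags).map (fun h => (h, (PySem.List.count hashtags h : Int)))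

-- ===== PRECONDITION & SPEC =====
def Spec_count_each_hashtags (hashtags : List String) (out : List (String × Int)) : Prop := out = count_each_hashtags_alt hashtags
instance (hashtags : List String) (out : List (String × Int)) : Decidable (Spec_count_each_hashtags hashtags out) := by unfold Spec_count_each_hashtags; infer_instance

-- ===== CLAIM (what is proved, stated in full; the proofs are below) =====
def Claim_equal_count_each_hashtags : Prop := ∀ (hashtags : List String), Dom_count_each_hashtags hashtags → Spec_count_each_hashtags hashtags (count_each_hashtags hashtags)

-- ===== LEMMAS AND PROOFS =====

-- ===== VERDICT (by name: the statement is the Claim_ definition above) =====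
lemma step_eq : (fun (d : PySem.Dict String Int) x =>
    if d.contains x then d.insert x (d.getD x 0 + 1) else d.insert x 1)
    = (fun d x => d.insert x (d.getD x 0 + 1)) := by
  funext d x
  by_cases h : d.contains x = true
  · simp [h]
  · have h0 : d.getD x 0 = 0 := by
      have hn := (PySem.Dict.get?_eq_none_iff_contains d x).mpr (by simpa using h)
      simp [PySem.Dict.getD, hn]
    simp [h, h0]

theorem count_each_hashtags_spec : Claim_equal_count_each_hashtags := by
  intro hashtags _
  unfold Spec_count_each_hashtags count_each_hashtags count_each_hashtags_alt
  rw [step_eq, PySem.Dict.foldl_insert_getD_add_one_eq_counter, PySem.Dict.items_counter]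
  simp [PySem.List.dedup_eq_ofList, PySem.List.count]
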